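-- pv_equiv track=rewrite | github.com/Helicopt/senseToolkit | senseTk/magic/GridSearch.py | gen_code
-- ===== SOURCE A (Python) =====
-- def gen_code(st, c):
-- 	b = 1
-- 	res = 0
-- 	l = len(st)
-- 	for i in range(l):
-- 		res += c[i]*b
-- 		b*=st[i][0]
-- 	return res
-- ===== SOURCE B (Python) =====
-- def gen_code(st, c):
--     res = 0
--     for row, x in reversed(list(zip(st, c))):
--         res = res * row[0] + x
--     return res
-- ===== Notes on version B (the rewrite author's own statement) =====
-- stated objective: simpler
-- what changed: Pairs each radix row with its coordinate via zip and folds Horner-style over the reversed pairs with a single accumulator, eliminating A's index loop and separate running base.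
import Mathlib
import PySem

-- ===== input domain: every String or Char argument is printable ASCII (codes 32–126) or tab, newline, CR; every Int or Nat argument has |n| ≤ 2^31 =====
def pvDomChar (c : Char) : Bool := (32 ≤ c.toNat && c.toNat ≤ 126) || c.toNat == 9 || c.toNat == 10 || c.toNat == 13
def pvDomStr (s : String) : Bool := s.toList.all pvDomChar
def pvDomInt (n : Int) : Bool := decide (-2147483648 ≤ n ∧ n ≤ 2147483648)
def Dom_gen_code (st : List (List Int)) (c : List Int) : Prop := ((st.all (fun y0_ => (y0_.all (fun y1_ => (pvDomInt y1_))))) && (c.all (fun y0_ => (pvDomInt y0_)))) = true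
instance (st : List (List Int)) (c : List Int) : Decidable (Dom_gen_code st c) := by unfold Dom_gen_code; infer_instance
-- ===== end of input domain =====

-- ===== PORT A =====
-- B zips radix rows with coordinates and folds Horner-style over the reversed pairs (simpler: one accumulator, no index loop, no running base).
def gen_code (st : List (List Int)) (c : List Int) : Int :=
  ((PySem.List.pyRange 0 (st.length : Int) 1).foldl
    (fun (p : Int × Int) i =>
      (p.1 * PySem.List.pyGetD (PySem.List.pyGetD st i []) 0 0,
       p.2 + PySem.List.pyGetD c i 0 * p.1))
    (1, 0)).2

-- ===== PORT B =====
def gen_code_alt (st : List (List Int)) (c : List Int) : Int :=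
  ((st.zip c).reverse).foldl
    (fun res p => res * PySem.List.pyGetD p.1 0 0 + p.2) 0

-- ===== PRECONDITION & SPEC =====
-- Pre_ excludes exactly the inputs on which Python A raises: c shorter than st (IndexError on c[i])
-- or an empty row in st (IndexError on st[i][0]).
def Pre_gen_code (st : List (List Int)) (c : List Int) : Prop :=
  st.length ≤ c.length ∧ ∀ row ∈ st, row ≠ []
instance (st : List (List Int)) (c : List Int) : Decidable (Pre_gen_code st c) := by unfold Pre_gen_code; infer_instance
def pvWitness_gen_code : List (List Int) × List Int := ([[2], [3]], [1, 1])
def Spec_gen_code (st : List (List Int)) (c : List Int) (out : Int) : Prop := out = gen_code_alt st c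
instance (st : List (List Int)) (c : List Int) (out : Int) : Decidable (Spec_gen_code st c out) := by unfold Spec_gen_code; infer_instance

-- ===== CLAIM (what is proved, stated in full; the proofs are below) =====
def Claim_equal_gen_code : Prop := ∀ (st : List (List Int)) (c : List Int), Dom_gen_code st c → Pre_gen_code st c → Spec_gen_code st c (gen_code st c)

-- ===== LEMMAS AND PROOFS =====

-- radix and coordinate at index i, as port A reads them
def pvRad (st : List (List Int)) (i : Int) : Int :=
  PySem.List.pyGetD (PySem.List.pyGetD st i []) 0 0
def pvCo (c : List Int) (i : Int) : Int := PySem.List.pyGetD c i 0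

-- forward product of radices and the mixed-radix value over the first n indices (A's loop invariant)
def pvProd (st : List (List Int)) : Nat → Int
  | 0 => 1
  | n + 1 => pvProd st n * pvRad st n
def pvVal (st : List (List Int)) (c : List Int) : Nat → Int
  | 0 => 0
  | n + 1 => pvVal st c n + pvCo c n * pvProd st n

-- structural (zip-shaped) product and value, matching B's traversal
def pvP : List (List Int) → List Int → Int
  | _, [] => 1
  | [], _ => 1
  | r :: st, _ :: c => PySem.List.pyGetD r 0 0 * pvP st c
def pvV : List (List Int) → List Int → Int
  | _, [] => 0
  | [], _ => 0
  | r :: st, x :: c => x + PySem.List.pyGetD r 0 0 * pvV st c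

theorem pvRad_shift (r : List Int) (st : List (List Int)) (k : Nat) :
    pvRad (r :: st) ((k : Int) + 1) = pvRad st k := by
  rw [show ((k : Int) + 1) = ((k + 1 : Nat) : Int) by push_cast; ring]
  unfold pvRad
  rw [PySem.List.pyGetD_natCast, PySem.List.pyGetD_natCast, List.getD_cons_succ]

theorem pvCo_shift (x : Int) (c : List Int) (k : Nat) :
    pvCo (x :: c) ((k : Int) + 1) = pvCo c k := by
  rw [show ((k : Int) + 1) = ((k + 1 : Nat) : Int) by push_cast; ring]
  unfold pvCo
  rw [PySem.List.pyGetD_natCast, PySem.List.pyGetD_natCast, List.getD_cons_succ]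

theorem pvProd_shift (r : List Int) (st : List (List Int)) (k : Nat) :
    pvProd (r :: st) (k + 1) = pvRad (r :: st) 0 * pvProd st k := by
  induction k with
  | zero =>
      show pvProd (r :: st) 0 * pvRad (r :: st) 0 = pvRad (r :: st) 0 * pvProd st 0
      show 1 * pvRad (r :: st) 0 = pvRad (r :: st) 0 * 1
      ring
  | succ k ih =>
      show pvProd (r :: st) (k + 1) * pvRad (r :: st) ((k + 1 : Nat) : Int)
          = pvRad (r :: st) 0 * (pvProd st k * pvRad st k)
      rw [ih, show ((k + 1 : Nat) : Int) = (k : Int) + 1 by push_cast; ring, pvRad_shift]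
      ring

theorem pvVal_shift (r : List Int) (st : List (List Int)) (x : Int) (c : List Int) (k : Nat) :
    pvVal (r :: st) (x :: c) (k + 1) = pvCo (x :: c) 0 + pvRad (r :: st) 0 * pvVal st c k := by
  induction k with
  | zero =>
      show pvVal (r :: st) (x :: c) 0 + pvCo (x :: c) 0 * pvProd (r :: st) 0
          = pvCo (x :: c) 0 + pvRad (r :: st) 0 * pvVal st c 0
      show (0 : Int) + pvCo (x :: c) 0 * 1 = pvCo (x :: c) 0 + pvRad (r :: st) 0 * 0
      ring
  | succ k ih =>
      show pvVal (r :: st) (x :: c) (k + 1) + pvCo (x :: c) ((k + 1 : Nat) : Int) * pvProd (r :: st) (k + 1)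
          = pvCo (x :: c) 0 + pvRad (r :: st) 0 * (pvVal st c k + pvCo c k * pvProd st k)
      rw [ih, pvProd_shift, show ((k + 1 : Nat) : Int) = (k : Int) + 1 by push_cast; ring, pvCo_shift]
      ring

theorem pvA_run (st : List (List Int)) (c : List Int) (n : Nat) :
    (PySem.List.pyRange 0 (n : Int) 1).foldl
      (fun (p : Int × Int) i =>
        (p.1 * PySem.List.pyGetD (PySem.List.pyGetD st i []) 0 0,
         p.2 + PySem.List.pyGetD c i 0 * p.1))
      (1, 0) = (pvProd st n, pvVal st c n) := by
  induction n with
  | zero => simp [PySem.List.pyRange_one_eq_nil, pvProd, pvVal]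
  | succ n ih =>
      rw [show ((n + 1 : Nat) : Int) = (n : Int) + 1 by push_cast; ring,
        PySem.List.pyRange_one_succ_right (by positivity)]
      simp [List.foldl_append, ih, pvProd, pvVal, pvRad, pvCo]

theorem pvVal_struct (st : List (List Int)) (c : List Int)
    (h : st.length ≤ c.length) : pvVal st c st.length = pvV st c := by
  induction st generalizing c with
  | nil => simp [pvVal]; cases c <;> simp [pvV]
  | cons r st ih =>
      cases c with
      | nil => simp at h
      | cons x c =>
          simp only [List.length_cons] at h ⊢
          rw [pvVal_shift, ih c (by omega)]
          simp [pvV, pvCo, pvRad]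

theorem pvB_run (st : List (List Int)) (c : List Int) (a : Int) :
    ((st.zip c).reverse).foldl
      (fun res p => res * PySem.List.pyGetD p.1 0 0 + p.2) a
      = a * pvP st c + pvV st c := by
  induction st generalizing c a with
  | nil => cases c <;> simp [pvP, pvV]
  | cons r st ih =>
      cases c with
      | nil => simp [pvP, pvV]
      | cons x c =>
          simp only [List.zip_cons_cons, List.reverse_cons, List.foldl_append,
            List.foldl_cons, List.foldl_nil]
          rw [ih]
          simp [pvP, pvV]; ring

-- ===== VERDICT (by name: the statement is the Claim_ definition above) =====
theorem gen_code_spec : Claim_equal_gen_code := by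
  intro st c _ hpre
  unfold Spec_gen_code gen_code gen_code_alt
  rw [pvA_run st c st.length, pvB_run st c 0]
  simp [pvVal_struct st c hpre.1]
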